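-- pv_equiv track=rewrite | github.com/josephmangara/phase-3-week-1 | lib/consonant.py | consonant_value
-- ===== SOURCE A (Python) =====
-- def consonant_value(s):
--     #calculating the value of a substring
--     def substrings(sub):
--         return sum(ord(c) - ord("a") + 1 for c in sub)
--     #initializing variables for the current substring and maximum value
--     current_substring = ""
--     maximum_value = 0
--
--     #iterating through the string characters and assessing whether they as consonants.
--     for char in s:
--         #checking if the character is a consonant and updating the maximum value
--         if char not in "aeiou":
--             current_substring += char
--         else:
--             if current_substring:
--                 current_value = substrings(current_substring)
--                 maximum_value = max(maximum_value, current_value)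
--                 current_substring = ""
--     #checking whether the last substring extends to the end of the string
--     if current_substring:
--         maximum_value - max(maximum_value, substrings(current_substring))
--     return maximum_value
-- ===== SOURCE B (Python) =====
-- def consonant_value(s):
--     marked = "".join("a" if c in "aeiou" else c for c in s)
--     values = [sum(ord(c) - ord("a") + 1 for c in g) for g in marked.split("a")]
--     return max([0] + values)
-- ===== Notes on version B (the rewrite author's own statement) =====
-- stated objective: idiomatic
-- what changed: Replaces the character-by-character accumulator/reset loop with a build-all-groups-then-reduce pass (normalise vowels to one separator, split into consonant runs, take the max of the run values), and fixes A's final no-op statement so the trailing consonant run counts.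
-- intended difference: On strings whose trailing consonant run has a letter-value sum greater than every vowel-terminated run's sum, A returns the max over vowel-terminated runs only because its final statement computes the max with the trailing run but discards the result instead of assigning it (an evident typo), while B returns the trailing run's sum, which is the value that final check clearly intended. — e.g. on consonant_value("ab"): A returns 0, B returns 2
import Mathlib
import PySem

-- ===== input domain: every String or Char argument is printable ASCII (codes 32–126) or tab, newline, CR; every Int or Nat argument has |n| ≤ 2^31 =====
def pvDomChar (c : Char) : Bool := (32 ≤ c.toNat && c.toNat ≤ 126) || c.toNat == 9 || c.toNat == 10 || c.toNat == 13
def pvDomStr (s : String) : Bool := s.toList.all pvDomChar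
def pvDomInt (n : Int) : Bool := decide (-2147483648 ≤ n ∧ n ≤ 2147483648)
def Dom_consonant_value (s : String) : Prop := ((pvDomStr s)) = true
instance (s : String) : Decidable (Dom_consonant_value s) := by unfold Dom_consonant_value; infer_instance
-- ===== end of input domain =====

-- B rebuilds the result as "split into consonant runs, then reduce", and fixes A's no-op last line
-- so the trailing consonant run counts (stated as the intended difference D_ below).

-- ===== PORT A =====
-- helper `substrings`: sum(ord(c) - ord("a") + 1 for c in sub)
def pvSubstringsA (sub : List Char) : Int :=
  sub.foldl (fun acc c => acc + ((c.toNat : Int) - 97 + 1)) 0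

-- the for-loop over the characters, state = (current_substring, maximum_value);
-- the final `if current_substring: maximum_value - max(...)` is an expression statement whose
-- value Python discards, so it changes nothing and the loop result is returned unchanged.
-- one iteration of the loop body, on the state (current_substring, maximum_value)
def pvStepA (st : List Char × Int) (char : Char) : List Char × Int :=
  if ¬ (PySem.Chars.isIn [char] "aeiou".toList = true) then
    (st.1 ++ [char], st.2)
  else
    if st.1 ≠ [] then ([], max st.2 (pvSubstringsA st.1)) else st

def consonant_value (s : String) : Int :=
  (s.toList.foldl pvStepA ([], 0)).2

-- ===== PORT B =====
-- marked.split("a") for the 1-character separator "a" is exactly List.splitOn 'a' on the characters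
-- (empty pieces kept, "".split("a") = [""]); max([0] + values) folds max over values starting at 0.
def consonant_value_alt (s : String) : Int :=
  let marked := s.toList.map (fun c => if PySem.Chars.isIn [c] "aeiou".toList then 'a' else c)
  let values := (marked.splitOn 'a').map
    (fun g => g.foldl (fun acc c => acc + ((c.toNat : Int) - 97 + 1)) 0)
  values.foldl max 0

-- ===== PRECONDITION & SPEC =====
-- helper D_ is stated with (independent of both ports): one pass over the characters keeping
-- (best value among vowel-terminated consonant runs so far, value of the still-open run)
def pvRunStats (l : List Char) : Int × Int :=
  l.foldl
    (fun st c =>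
      if c ∈ ['a', 'e', 'i', 'o', 'u'] then (max st.1 st.2, 0)
      else (st.1, st.2 + ((c.toNat : Int) - 96)))
    (0, 0)

-- On strings whose trailing consonant run has a letter-value sum greater than every
-- vowel-terminated run's sum, A returns the max over vowel-terminated runs only (its final
-- statement computes the max with the trailing run but discards the result instead of assigning
-- it — an evident typo), while B returns the trailing run's sum, which is what that final check
-- clearly intended.
def D_consonant_value (s : String) : Prop :=
  (pvRunStats s.toList).2 > (pvRunStats s.toList).1

instance (s : String) : Decidable (D_consonant_value s) := by
  unfold D_consonant_value; infer_instance

def Spec_consonant_value (s : String) (out : Int) : Prop :=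
  ¬ D_consonant_value s → out = consonant_value_alt s
instance (s : String) (out : Int) : Decidable (Spec_consonant_value s out) := by
  unfold Spec_consonant_value; infer_instance

def pvDiffWitness_consonant_value : String := "ab"
def pvDiffWitnessOut_consonant_value : Int × Int := (0, 2)

-- ===== CLAIM (what is proved, stated in full; the proofs are below) =====
def Claim_unchanged_consonant_value : Prop :=
  ∀ (s : String), Dom_consonant_value s → Spec_consonant_value s (consonant_value s)
def Claim_changed_consonant_value : Prop :=
  Dom_consonant_value (pvDiffWitness_consonant_value) ∧
  D_consonant_value (pvDiffWitness_consonant_value) ∧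
  consonant_value (pvDiffWitness_consonant_value) = pvDiffWitnessOut_consonant_value.1 ∧
  consonant_value_alt (pvDiffWitness_consonant_value) = pvDiffWitnessOut_consonant_value.2 ∧
  pvDiffWitnessOut_consonant_value.1 ≠ pvDiffWitnessOut_consonant_value.2
def Claim_exact_consonant_value : Prop :=
  ∀ (s : String), Dom_consonant_value s → D_consonant_value s →
    consonant_value s ≠ consonant_value_alt s

-- ===== LEMMAS AND PROOFS =====

-- the maximal consonant runs of s (first run, later runs; each later run is preceded by a vowel)
def pvRunsAux (l : List Char) : List Char × List (List Char) :=
  match l with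
  | [] => ([], [])
  | c :: t =>
    let r := pvRunsAux t
    if c ∈ ['a', 'e', 'i', 'o', 'u'] then ([], r.1 :: r.2) else (c :: r.1, r.2)

def pvRuns (l : List Char) : List (List Char) := (pvRunsAux l).1 :: (pvRunsAux l).2

-- a run's letter value: sum of code points, shifted so that 'a' = 1 ⇒ total shift 96·|g|
def pvRunVal (g : List Char) : Int := (g.map (fun c => (c.toNat : Int))).sum - 96 * g.length

theorem pvRunVal_nil : pvRunVal [] = 0 := rfl

theorem pvRunVal_cons (c : Char) (g : List Char) :
    pvRunVal (c :: g) = ((c.toNat : Int) - 96) + pvRunVal g := by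
  unfold pvRunVal
  simp only [List.map_cons, List.sum_cons, List.length_cons]
  push_cast
  ring

-- the one-pass statistics, from an arbitrary state, in terms of the runs
theorem stats_fold (l : List Char) (b cacc : Int) :
    l.foldl
      (fun st c =>
        if c ∈ ['a', 'e', 'i', 'o', 'u'] then (max st.1 st.2, 0)
        else (st.1, st.2 + ((c.toNat : Int) - 96)))
      (b, cacc)
      = ((((cacc + pvRunVal (pvRunsAux l).1) :: (pvRunsAux l).2.map pvRunVal).dropLast).foldl max b,
         ((cacc + pvRunVal (pvRunsAux l).1) :: (pvRunsAux l).2.map pvRunVal).getLastD 0) := by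
  induction l generalizing b cacc with
  | nil => simp [pvRunsAux, pvRunVal]
  | cons c t ih =>
    rw [List.foldl_cons]
    by_cases hc : c ∈ ['a', 'e', 'i', 'o', 'u']
    · rw [if_pos hc, ih (max b cacc) 0]
      simp [pvRunsAux, hc, List.dropLast_cons₂, pvRunVal_nil]
    · rw [if_neg hc, ih b (cacc + ((c.toNat : Int) - 96))]
      simp [pvRunsAux, hc, pvRunVal_cons]
      constructor
      · have : cacc + ((c.toNat : Int) - 96) + pvRunVal (pvRunsAux t).1
            = cacc + (((c.toNat : Int) - 96) + pvRunVal (pvRunsAux t).1) := by ring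
        rw [this]
      · have : cacc + ((c.toNat : Int) - 96) + pvRunVal (pvRunsAux t).1
            = cacc + (((c.toNat : Int) - 96) + pvRunVal (pvRunsAux t).1) := by ring
        rw [this]

-- D_ in terms of the runs
theorem D_iff (s : String) : D_consonant_value s ↔
    pvRunVal ((pvRuns s.toList).getLastD []) >
      ((pvRuns s.toList).dropLast.map pvRunVal).foldl max 0 := by
  unfold D_consonant_value pvRunStats
  rw [stats_fold]
  have hmap : (0 + pvRunVal (pvRunsAux s.toList).1) :: (pvRunsAux s.toList).2.map pvRunVal
      = (pvRuns s.toList).map pvRunVal := by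
    simp [pvRuns]
  rw [hmap]
  have hne : pvRuns s.toList ≠ [] := by simp [pvRuns]
  have h1 : ((pvRuns s.toList).map pvRunVal).getLastD 0
      = pvRunVal ((pvRuns s.toList).getLastD []) := by
    rw [List.getLastD_eq_getLast?, List.getLastD_eq_getLast?, List.getLast?_map]
    rw [List.getLast?_eq_some_getLast hne]
    simp
  have h2 : ((pvRuns s.toList).map pvRunVal).dropLast
      = (pvRuns s.toList).dropLast.map pvRunVal := List.map_dropLast.symm
  dsimp only
  rw [h1, h2]

-- the membership test both ports make: `c in "aeiou"` is list membership of the character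
theorem pv_isIn_vowels (c : Char) :
    PySem.Chars.isIn [c] "aeiou".toList = true ↔ c ∈ ['a', 'e', 'i', 'o', 'u'] := by
  rw [PySem.Chars.isIn_iff_infix]
  constructor
  · intro h
    simpa using h.subset (by simp)
  · intro h
    fin_cases h <;> decide

-- A's helper computes the run value
theorem pvSubstringsA_eq (g : List Char) : pvSubstringsA g = pvRunVal g := by
  unfold pvSubstringsA pvRunVal
  rw [PySem.List.foldl_add, zero_add]
  induction g with
  | nil => simp
  | cons c t ih => simp only [List.map_cons, List.sum_cons, List.length_cons]; push_cast; rw [ih]; ring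
-- A's loop, from an arbitrary state
theorem A_fold (l : List Char) (cur : List Char) (mx : Int) (h : 0 ≤ mx) :
    (l.foldl pvStepA (cur, mx)).2
      = ((((cur ++ (pvRunsAux l).1) :: (pvRunsAux l).2).dropLast).map pvRunVal).foldl max mx := by
  induction l generalizing cur mx with
  | nil => simp [pvRunsAux]
  | cons c t ih =>
    rw [List.foldl_cons]
    by_cases hv : PySem.Chars.isIn [c] "aeiou".toList = true
    · have hc : c ∈ ['a', 'e', 'i', 'o', 'u'] := (pv_isIn_vowels c).mp hv
      have hv2 : PySem.Chars.isIn [c] ['a', 'e', 'i', 'o', 'u'] = true := by simpa using hv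
      by_cases hcur : cur = []
      · subst hcur
        rw [show pvStepA ([], mx) c = ([], mx) from by simp [pvStepA, hv2]]
        rw [ih [] mx h]
        simp [pvRunsAux, hc, List.dropLast_cons₂, pvRunVal, max_eq_left h]
      · rw [show pvStepA (cur, mx) c = ([], max mx (pvSubstringsA cur)) from by
          simp [pvStepA, hv2, hcur]]
        rw [ih [] (max mx (pvSubstringsA cur)) (le_trans h (le_max_left _ _))]
        simp [pvRunsAux, hc, List.dropLast_cons₂, pvSubstringsA_eq]
    · have hc : c ∉ ['a', 'e', 'i', 'o', 'u'] := fun h => hv ((pv_isIn_vowels c).mpr h)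
      have hv2 : ¬ PySem.Chars.isIn [c] ['a', 'e', 'i', 'o', 'u'] = true := by simpa using hv
      rw [show pvStepA (cur, mx) c = (cur ++ [c], mx) from by simp [pvStepA, hv2]]
      rw [ih (cur ++ [c]) mx h]
      simp [pvRunsAux, hc, List.append_assoc]

-- splitting the vowel-normalised string on 'a' yields exactly the consonant runs
theorem pv_split_marked (l : List Char) :
    ((l.map (fun c => if PySem.Chars.isIn [c] "aeiou".toList then 'a' else c)).splitOn 'a')
      = pvRuns l := by
  induction l with
  | nil => rfl
  | cons c t ih =>
    show List.splitOnP _ _ = _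
    rw [List.map_cons, List.splitOnP_cons]
    by_cases hv : PySem.Chars.isIn [c] "aeiou".toList = true
    · have hc : c ∈ ['a', 'e', 'i', 'o', 'u'] := (pv_isIn_vowels c).mp hv
      simp only [hv, if_true]
      rw [if_pos (by simp : (('a' == 'a') = true))]
      rw [show List.splitOnP (· == 'a') (t.map _) = _ from ih]
      simp [pvRuns, pvRunsAux, hc]
    · have hc : c ∉ ['a', 'e', 'i', 'o', 'u'] := fun h => hv ((pv_isIn_vowels c).mpr h)
      have hca : c ≠ 'a' := fun h => hc (by rw [h]; decide)
      simp only [hv, if_false, Bool.false_eq_true]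
      rw [if_neg (by simpa using hca : ¬ ((c == 'a') = true))]
      rw [show List.splitOnP (· == 'a') (t.map _) = _ from ih]
      simp [pvRuns, pvRunsAux, hc, List.modifyHead_cons]

-- B computes the max over all runs (including the trailing one)
theorem B_eq (s : String) :
    consonant_value_alt s = ((pvRuns s.toList).map pvRunVal).foldl max 0 := by
  show (((s.toList.map (fun c => if PySem.Chars.isIn [c] "aeiou".toList then 'a' else c)).splitOn 'a').map
      (fun g => g.foldl (fun acc c => acc + ((c.toNat : Int) - 97 + 1)) 0)).foldl max 0 = _
  rw [pv_split_marked]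
  have : (fun g : List Char => g.foldl (fun acc c => acc + ((c.toNat : Int) - 97 + 1)) 0)
      = pvRunVal := by
    funext g; exact pvSubstringsA_eq g
  rw [this]

theorem A_eq (s : String) :
    consonant_value s = ((pvRuns s.toList).dropLast.map pvRunVal).foldl max 0 := by
  have := A_fold s.toList [] 0 le_rfl
  simpa [consonant_value, pvRuns] using this

theorem B_eq_max (s : String) :
    consonant_value_alt s = max (consonant_value s) (pvRunVal ((pvRuns s.toList).getLastD [])) := by
  rw [B_eq, A_eq]
  have hne : pvRuns s.toList ≠ [] := by simp [pvRuns]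
  have hlast : (pvRuns s.toList).getLastD [] = (pvRuns s.toList).getLast hne := by
    rw [List.getLastD_eq_getLast?, List.getLast?_eq_some_getLast hne, Option.getD_some]
  rw [hlast]
  conv_lhs => rw [← List.dropLast_append_getLast hne]
  rw [List.map_append, List.foldl_append]
  simp

-- ===== VERDICT =====
theorem consonant_value_spec : Claim_unchanged_consonant_value := by
  intro s _ hD
  rw [B_eq_max s]
  rw [D_iff] at hD
  rw [← A_eq s] at hD
  omega
theorem consonant_value_changed : Claim_changed_consonant_value := by
  unfold Claim_changed_consonant_value; decide
theorem consonant_value_tight : Claim_exact_consonant_value := by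
  intro s _ hD
  have hB := B_eq_max s
  rw [D_iff] at hD
  rw [← A_eq s] at hD
  omega
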